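-- pv_equiv track=rewrite | github.com/william-c-stanford/lablink | src/lablink/parsers/balance.py | _find_data_header
-- ===== SOURCE A (Python) =====
-- from typing import Any, ClassVar
--
-- def _find_data_header(
--     lines: list[str], raw_meta: dict[str, Any]
-- ) -> int:
--     """Find the index of the CSV data header row, extracting metadata above it."""
--     for i, line in enumerate(lines):
--         lower = line.lower().strip()
--         # Check if this line looks like a CSV data header
--         if any(
--             kw in lower
--             for kw in ("mass", "weight", "net", "gross", "value", "sample")
--         ):
--             return i
--         # Extract key: value metadata from preamble
--         if ":" in line and not any(c.isdigit() for c in line.split(":")[0]):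
--             key, _, val = line.partition(":")
--             key = key.strip()
--             val = val.strip()
--             if key and val:
--                 raw_meta[key] = val
--     return 0
-- ===== SOURCE B (Python) =====
-- def _find_data_header(lines, raw_meta):
--     # Two-phase decomposition: first locate the header row, then harvest
--     # key: value metadata from the preamble above it (mutates raw_meta like A).
--     header_idx = next(
--         (i for i, line in enumerate(lines)
--          if any(kw in line.lower().strip()
--                 for kw in ("mass", "weight", "net", "gross", "value", "sample"))),
--         None,
--     )
--     preamble = lines if header_idx is None else lines[:header_idx]
--     for line in preamble:
--         if ":" in line:
--             key, _, val = line.partition(":")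
--             if not any(c.isdigit() for c in key):
--                 key, val = key.strip(), val.strip()
--                 if key and val:
--                     raw_meta[key] = val
--     return 0 if header_idx is None else header_idx
-- ===== Notes on version B (the rewrite author's own statement) =====
-- stated objective: alternative
-- what changed: Replaces A's single loop with interleaved early-return and metadata extraction by a two-phase decomposition: first find the header index with next() over the keyword test, then run a separate metadata pass over the preamble slice and return the index (0 when no header).
import Mathlib
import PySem

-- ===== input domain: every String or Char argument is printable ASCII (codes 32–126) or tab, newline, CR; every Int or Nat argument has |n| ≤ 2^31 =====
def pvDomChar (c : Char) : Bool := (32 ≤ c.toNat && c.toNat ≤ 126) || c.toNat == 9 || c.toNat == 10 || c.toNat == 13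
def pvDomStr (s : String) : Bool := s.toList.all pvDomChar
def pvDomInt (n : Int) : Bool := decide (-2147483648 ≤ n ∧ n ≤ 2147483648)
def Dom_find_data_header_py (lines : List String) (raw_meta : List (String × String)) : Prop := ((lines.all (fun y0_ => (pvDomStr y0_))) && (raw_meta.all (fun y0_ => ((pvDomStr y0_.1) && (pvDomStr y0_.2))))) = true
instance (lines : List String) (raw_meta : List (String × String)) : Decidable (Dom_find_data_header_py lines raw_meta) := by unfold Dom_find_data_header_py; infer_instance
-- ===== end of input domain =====

-- B restates A as two phases: find the header index first, then a separate metadata pass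
-- over the preamble ('alternative' decomposition, same cost). Both mutate raw_meta the same
-- way in Python; the equivalence proved here is about the RETURN value only.

-- ===== PORT A =====
-- any(kw in lower for kw in ("mass","weight","net","gross","value","sample"))
def pvKwA (lower : String) : Bool :=
  PySem.Str.isIn "mass" lower || PySem.Str.isIn "weight" lower || PySem.Str.isIn "net" lower ||
  PySem.Str.isIn "gross" lower || PySem.Str.isIn "value" lower || PySem.Str.isIn "sample" lower

-- line.partition(":") ported by hand: chars before the first ':' / chars after it (exact,
-- since partition splits at the first occurrence of the one-char separator).
def pvPartKey (line : String) : String := String.ofList (line.toList.takeWhile (fun c => c ≠ ':'))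
def pvPartVal (line : String) : String := String.ofList ((line.toList.dropWhile (fun c => c ≠ ':')).drop 1)

-- A's single loop: keyword check with early return, else metadata extraction into the dict.
def pvALoop : List String → Int → PySem.Dict String String → Int
  | [], _, _ => 0
  | line :: rest, i, d =>
    let lower := PySem.Str.strip (PySem.Str.lower line)
    if pvKwA lower then i
    else
      -- ":" in line and not any(c.isdigit() for c in line.split(":")[0])
      let d' :=
        if PySem.Str.isIn ":" line && !((pvPartKey line).toList.any PySem.Chars.isdigit) then
          let key := PySem.Str.strip (pvPartKey line)
          let val := PySem.Str.strip (pvPartVal line)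
          if key ≠ "" && val ≠ "" then d.insert key val else d
        else d
      pvALoop rest (i + 1) d'

def find_data_header_py (lines : List String) (raw_meta : List (String × String)) : Int :=
  pvALoop lines 0 (PySem.Dict.mk raw_meta)

-- ===== PORT B =====
def pvKwB (lower : String) : Bool :=
  PySem.Str.isIn "mass" lower || PySem.Str.isIn "weight" lower || PySem.Str.isIn "net" lower ||
  PySem.Str.isIn "gross" lower || PySem.Str.isIn "value" lower || PySem.Str.isIn "sample" lower

-- Phase 1: next((i for i, line in enumerate(lines) if <keyword test>), None)
def pvFindHeader : List String → Int → Option Int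
  | [], _ => none
  | line :: rest, i =>
    if pvKwB (PySem.Str.strip (PySem.Str.lower line)) then some i
    else pvFindHeader rest (i + 1)

-- Phase 2 body: one preamble line's key: value extraction into the dict.
def pvMetaStep (d : PySem.Dict String String) (line : String) : PySem.Dict String String :=
  if PySem.Str.isIn ":" line then
    let key0 := String.ofList (line.toList.takeWhile (fun c => c ≠ ':'))
    let val0 := String.ofList ((line.toList.dropWhile (fun c => c ≠ ':')).drop 1)
    if !(key0.toList.any PySem.Chars.isdigit) then
      let key := PySem.Str.strip key0
      let val := PySem.Str.strip val0
      if key ≠ "" && val ≠ "" then d.insert key val else d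
    else d
  else d

def find_data_header_py_alt (lines : List String) (raw_meta : List (String × String)) : Int :=
  let headerIdx := pvFindHeader lines 0
  let preamble := match headerIdx with
    | none => lines
    | some i => PySem.List.slice lines none (some i)
  let _md := preamble.foldl pvMetaStep (PySem.Dict.mk raw_meta)  -- mutation of raw_meta; unused by the return value
  match headerIdx with
  | none => 0
  | some i => i

-- ===== PRECONDITION & SPEC =====
def Spec_find_data_header_py (lines : List String) (raw_meta : List (String × String)) (out : Int) : Prop := out = find_data_header_py_alt lines raw_meta
instance (lines : List String) (raw_meta : List (String × String)) (out : Int) : Decidable (Spec_find_data_header_py lines raw_meta out) := by unfold Spec_find_data_header_py; infer_instance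

-- ===== CLAIM (what is proved, stated in full; the proofs are below) =====
def Claim_equal_find_data_header_py : Prop := ∀ (lines : List String) (raw_meta : List (String × String)), Dom_find_data_header_py lines raw_meta → Spec_find_data_header_py lines raw_meta (find_data_header_py lines raw_meta)

-- ===== LEMMAS AND PROOFS =====
lemma pvALoop_eq (l : List String) : ∀ (i : Int) (d : PySem.Dict String String),
    pvALoop l i d = (match pvFindHeader l i with | some j => j | none => 0) := by
  induction l with
  | nil => intro i d; simp [pvALoop, pvFindHeader]
  | cons line rest ih =>
    intro i d
    simp only [pvALoop, pvFindHeader]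
    by_cases h : pvKwA (PySem.Str.strip (PySem.Str.lower line))
    · have hb : pvKwB (PySem.Str.strip (PySem.Str.lower line)) = true := h
      simp [h, hb]
    · have hb : pvKwB (PySem.Str.strip (PySem.Str.lower line)) = false := by
        simpa using h
      simp [h, hb, ih]

-- ===== VERDICT (by name: the statement is the Claim_ definition above) =====
theorem find_data_header_py_spec : Claim_equal_find_data_header_py := by
  intro lines raw_meta _
  unfold Spec_find_data_header_py find_data_header_py find_data_header_py_alt
  rw [pvALoop_eq]
  cases pvFindHeader lines 0 <;> simp
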